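-- pv_equiv track=rewrite | github.com/xiongyuchuan3294/azkaban-aml | workspace/bigdata-test/skills/requirement-impact-analysis/scripts/analyze_requirement_impact.py | build_graph_helpers
-- ===== SOURCE A (Python) =====
-- from collections import defaultdict, deque
--
-- def build_graph_helpers(node_edges: list[dict[str, str]]) -> tuple[dict[str, set[str]], dict[str, set[str]]]:
--     forward: dict[str, set[str]] = defaultdict(set)
--     reverse: dict[str, set[str]] = defaultdict(set)
--     for edge in node_edges:
--         left = edge.get("from", "")
--         right = edge.get("to", "")
--         if not left or not right:
--             continue
--         forward[left].add(right)
--         reverse[right].add(left)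
--     return forward, reverse
-- ===== SOURCE B (Python) =====
-- from collections import defaultdict
--
--
-- def build_graph_helpers(node_edges: list[dict[str, str]]) -> tuple[dict[str, set[str]], dict[str, set[str]]]:
--     # Collect the valid (from, to) pairs once, then build each map by
--     # grouping: keys in first-appearance order, values as set comprehensions.
--     pairs = []
--     for edge in node_edges:
--         left = edge.get("from", "")
--         right = edge.get("to", "")
--         if left and right:
--             pairs.append((left, right))
--
--     def group(items):
--         keys = list(dict.fromkeys(k for k, _ in items))
--         return {k: {v for k2, v in items if k2 == k} for k in keys}
--
--     forward = defaultdict(set, group(pairs))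
--     reverse = defaultdict(set, group([(r, l) for l, r in pairs]))
--     return forward, reverse
-- ===== Notes on version B (the rewrite author's own statement) =====
-- stated objective: alternative
-- what changed: A threads two defaultdicts through one edge loop with incremental set.add; B first extracts the valid (from,to) pairs, then builds each adjacency map declaratively by grouping: ordered-dedup of keys plus a set comprehension per key (reverse obtained by grouping the swapped pairs).
import Mathlib
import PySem

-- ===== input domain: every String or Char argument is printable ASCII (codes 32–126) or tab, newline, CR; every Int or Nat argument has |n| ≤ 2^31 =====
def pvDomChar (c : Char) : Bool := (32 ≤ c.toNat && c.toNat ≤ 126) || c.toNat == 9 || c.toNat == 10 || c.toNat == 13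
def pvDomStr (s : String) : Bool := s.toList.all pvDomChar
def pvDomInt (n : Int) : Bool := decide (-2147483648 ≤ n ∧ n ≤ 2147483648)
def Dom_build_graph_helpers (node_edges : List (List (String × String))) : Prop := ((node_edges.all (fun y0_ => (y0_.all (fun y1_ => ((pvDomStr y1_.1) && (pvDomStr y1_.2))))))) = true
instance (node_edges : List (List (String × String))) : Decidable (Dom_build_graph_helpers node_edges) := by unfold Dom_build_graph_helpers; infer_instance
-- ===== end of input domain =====

-- B replaces A's single loop threading two incrementally-updated dicts by a pair
-- extraction pass followed by a declarative grouping (ordered-dedup of keys, one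
-- set comprehension per key); objective: alternative decomposition, same values.
-- Both programs return defaultdicts; the equivalence proved is about the returned
-- key/value data (the association lists), as the type convention prescribes.

-- ===== PORT A =====
def build_graph_helpers (node_edges : List (List (String × String))) : (List (String × List String)) × (List (String × List String)) :=
  let res := node_edges.foldl
    (fun (st : PySem.Dict String (List String) × PySem.Dict String (List String)) edge =>
      if (PySem.Dict.mk edge).getD "from" "" = "" ∨ (PySem.Dict.mk edge).getD "to" "" = "" then st
      else (st.1.modify ((PySem.Dict.mk edge).getD "from" "") [] (fun s => PySem.Set.add s ((PySem.Dict.mk edge).getD "to" "")),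
            st.2.modify ((PySem.Dict.mk edge).getD "to" "") [] (fun s => PySem.Set.add s ((PySem.Dict.mk edge).getD "from" ""))))
    (PySem.Dict.empty, PySem.Dict.empty)
  (res.1.items, res.2.items)

-- ===== PORT B =====
-- Source B's helper `group`: keys in first-appearance order, value set per key
def pvGroup (items : List (String × String)) : List (String × List String) :=
  (PySem.List.dedup (items.map (fun p => p.1))).map
    (fun k => (k, PySem.Set.ofList ((items.filter (fun p => p.1 == k)).map (fun p => p.2))))

def build_graph_helpers_alt (node_edges : List (List (String × String))) : (List (String × List String)) × (List (String × List String)) :=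
  let pairs := node_edges.foldl
    (fun acc edge =>
      if (PySem.Dict.mk edge).getD "from" "" ≠ "" ∧ (PySem.Dict.mk edge).getD "to" "" ≠ "" then
        acc ++ [((PySem.Dict.mk edge).getD "from" "", (PySem.Dict.mk edge).getD "to" "")]
      else acc) []
  (pvGroup pairs, pvGroup (pairs.map (fun p => (p.2, p.1))))

-- ===== PRECONDITION & SPEC =====
def Spec_build_graph_helpers (node_edges : List (List (String × String))) (out : (List (String × List String)) × (List (String × List String))) : Prop := out = build_graph_helpers_alt node_edges
instance (node_edges : List (List (String × String))) (out : (List (String × List String)) × (List (String × List String))) : Decidable (Spec_build_graph_helpers node_edges out) := by unfold Spec_build_graph_helpers; infer_instance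

-- ===== CLAIM (what is proved, stated in full; the proofs are below) =====
def Claim_equal_build_graph_helpers : Prop := ∀ (node_edges : List (List (String × String))), Dom_build_graph_helpers node_edges → Spec_build_graph_helpers node_edges (build_graph_helpers node_edges)

-- ===== LEMMAS AND PROOFS =====

def pvF (edge : List (String × String)) : String × String :=
  ((PySem.Dict.mk edge).getD "from" "", (PySem.Dict.mk edge).getD "to" "")

def pvPb (edge : List (String × String)) : Bool :=
  !decide ((PySem.Dict.mk edge).getD "from" "" = "") && !decide ((PySem.Dict.mk edge).getD "to" "" = "")

-- B's pair-extraction loop is filter-then-map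
lemma pvPairs_eq (node_edges : List (List (String × String))) :
    node_edges.foldl
      (fun acc edge =>
        if (PySem.Dict.mk edge).getD "from" "" ≠ "" ∧ (PySem.Dict.mk edge).getD "to" "" ≠ "" then
          acc ++ [((PySem.Dict.mk edge).getD "from" "", (PySem.Dict.mk edge).getD "to" "")]
        else acc) [] =
    (node_edges.filter pvPb).map pvF := by
  have h := PySem.List.foldl_append_ite
      (p := fun e : List (String × String) =>
        (PySem.Dict.mk e).getD "from" "" ≠ "" ∧ (PySem.Dict.mk e).getD "to" "" ≠ "")
      (f := pvF) node_edges []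
  simpa [pvF, pvPb] using h

-- A's guarded loop over edges is the pair of modify-folds over the extracted pairs
lemma pvAfold (es : List (List (String × String))) :
    ∀ (d1 d2 : PySem.Dict String (List String)),
    es.foldl
      (fun (st : PySem.Dict String (List String) × PySem.Dict String (List String)) edge =>
        if (PySem.Dict.mk edge).getD "from" "" = "" ∨ (PySem.Dict.mk edge).getD "to" "" = "" then st
        else (st.1.modify ((PySem.Dict.mk edge).getD "from" "") [] (fun s => PySem.Set.add s ((PySem.Dict.mk edge).getD "to" "")),
              st.2.modify ((PySem.Dict.mk edge).getD "to" "") [] (fun s => PySem.Set.add s ((PySem.Dict.mk edge).getD "from" ""))))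
      (d1, d2) =
    (((es.filter pvPb).map pvF).foldl (fun d q => d.modify q.1 [] (fun s => PySem.Set.add s q.2)) d1,
     ((es.filter pvPb).map pvF).foldl (fun d q => d.modify q.2 [] (fun s => PySem.Set.add s q.1)) d2) := by
  induction es with
  | nil => intro d1 d2; rfl
  | cons e t ih =>
    intro d1 d2
    by_cases h : (PySem.Dict.mk e).getD "from" "" = "" ∨ (PySem.Dict.mk e).getD "to" "" = ""
    · have hb : pvPb e = false := by simp [pvPb]; tauto
      simp only [List.foldl_cons, List.filter_cons, hb, if_pos h, Bool.false_eq_true, if_false]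
      exact ih d1 d2
    · have hb : pvPb e = true := by simp [pvPb]; tauto
      simp only [List.foldl_cons, List.filter_cons, hb, if_neg h, if_true, List.map_cons, pvF]
      exact ih _ _
  
-- lookup after the modify-fold = running Set.add over the grouped values
lemma pvGetD_fold (P : List (String × String)) :
    ∀ (d : PySem.Dict String (List String)) (c : String),
      (P.foldl (fun d q => d.modify q.1 [] (fun s => PySem.Set.add s q.2)) d).getD c [] =
      ((P.filter (fun q => q.1 == c)).map (fun q => q.2)).foldl PySem.Set.add (d.getD c []) := by
  induction P with
  | nil => intro d c; rfl
  | cons q t ih =>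
    intro d c
    by_cases h : q.1 = c
    · subst h
      simp only [List.foldl_cons, List.filter_cons, beq_self_eq_true, if_true, List.map_cons]
      rw [ih, PySem.Dict.getD_modify_self]
    · have hb : (q.1 == c) = false := by simpa using h
      simp only [List.foldl_cons, List.filter_cons, hb, Bool.false_eq_true, if_false]
      rw [ih, PySem.Dict.getD_modify_of_ne _ _ _ (fun hc => h hc.symm)]

-- the modify-fold from the empty dict, read off as items, IS Source B's group
lemma pvItems_fold (P : List (String × String)) :
    (P.foldl (fun d q => d.modify q.1 [] (fun s => PySem.Set.add s q.2))
      (PySem.Dict.empty : PySem.Dict String (List String))).items = pvGroup P := by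
  have hkeys := PySem.Dict.keys_foldl_modify_key P (fun q => q.1) []
      (fun _ q => fun s => PySem.Set.add s q.2) PySem.Dict.empty
  have hnd := PySem.Dict.nodup_keys_foldl_modify_key P (fun q => q.1) []
      (fun _ q => fun s => PySem.Set.add s q.2) PySem.Dict.empty
      (by simp [pysem])
  rw [PySem.Dict.items_eq_map_keys _ hnd []]
  rw [hkeys]
  have hupd : PySem.Set.update (PySem.Dict.empty : PySem.Dict String (List String)).keys (P.map fun q => q.1)
      = PySem.Set.ofList (P.map fun q => q.1) := rfl
  rw [hupd]
  unfold pvGroup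
  rw [PySem.List.dedup_eq_ofList]
  apply List.map_congr_left
  intro k _
  rw [pvGetD_fold]
  simp [pysem, PySem.Set.ofList]

-- the reverse map is the forward grouping of the swapped pairs
lemma pvRev (P : List (String × String)) (d : PySem.Dict String (List String)) :
    P.foldl (fun d q => d.modify q.2 [] (fun s => PySem.Set.add s q.1)) d =
    (P.map (fun q => (q.2, q.1))).foldl (fun d q => d.modify q.1 [] (fun s => PySem.Set.add s q.2)) d := by
  rw [List.foldl_map]

-- ===== VERDICT (by name: the statement is the Claim_ definition above) =====
theorem build_graph_helpers_spec : Claim_equal_build_graph_helpers := by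
  intro node_edges _
  simp only [Spec_build_graph_helpers, build_graph_helpers, build_graph_helpers_alt]
  rw [pvPairs_eq, pvAfold]
  rw [pvRev]
  rw [pvItems_fold, pvItems_fold]
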